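-- pv_equiv track=rewrite | github.com/Fchaubard/can_ai_learn_basic_functions | ntm_with_modern_training_runs.py | tokenize_special
-- ===== SOURCE A (Python) =====
-- def tokenize_special(s):
--     """
--     Example tokenizer that treats any substring like <bos>, <eos>, <PAD>, etc.
--     as *single* tokens if present. Otherwise, each character is its own token.
--
--     This is just a toy example. Adjust it to fit your needs (e.g. handling
--     <bos>... in the input more robustly).
--     """
--     tokens = []
--     i = 0
--     while i < len(s):
--         if s[i] == '<':
--             # Try to find the matching '>'
--             j = s.find('>', i + 1)
--             if j == -1:
--                 # No '>' found => treat '<' as a normal character (unlikely in well-formed data).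
--                 tokens.append(s[i])
--                 i += 1
--             else:
--                 # Collect the full '<...>'
--                 tokens.append(s[i : j+1])
--                 i = j + 1
--         else:
--             # Normal character
--             tokens.append(s[i])
--             i += 1
--     return tokens
-- ===== SOURCE B (Python) =====
-- def tokenize_special(s):
--     """Single-pass state-machine tokenizer: collect a pending '<...' buffer and
--     close it at the first '>'; a buffer never closed flushes as single chars."""
--     tokens = []
--     buf = None  # chars of a pending '<...' token, or None
--     for ch in s:
--         if buf is None:
--             if ch == '<':
--                 buf = [ch]
--             else:
--                 tokens.append(ch)
--         else:
--             buf.append(ch)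
--             if ch == '>':
--                 tokens.append(''.join(buf))
--                 buf = None
--     if buf is not None:
--         tokens.extend(buf)  # no closing '>' existed: each char is its own token
--     return tokens
-- ===== Notes on version B (the rewrite author's own statement) =====
-- stated objective: faster
-- what changed: Replaced A's index loop that calls s.find('>', i+1) for every '<' (rescanning the tail each time) with a single left-to-right pass that accumulates a pending '<...' buffer and closes it at the first '>', flushing an unclosed buffer as single-character tokens at the end.
import Mathlib
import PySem

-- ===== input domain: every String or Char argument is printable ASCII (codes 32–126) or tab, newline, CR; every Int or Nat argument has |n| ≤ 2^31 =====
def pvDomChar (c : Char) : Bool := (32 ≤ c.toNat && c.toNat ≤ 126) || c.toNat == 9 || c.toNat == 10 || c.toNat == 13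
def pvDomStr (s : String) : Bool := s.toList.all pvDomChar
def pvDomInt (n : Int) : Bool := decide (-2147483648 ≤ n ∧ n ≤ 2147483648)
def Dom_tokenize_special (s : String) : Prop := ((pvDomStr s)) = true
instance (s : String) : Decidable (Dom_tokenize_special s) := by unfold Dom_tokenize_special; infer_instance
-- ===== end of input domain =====

-- B replaces A's repeated `s.find('>', i+1)` scans by a single left-to-right pass with a
-- pending-token buffer (objective: faster in the worst case — one pass instead of rescans).

-- ===== PORT A =====
-- termination helper for A's loop: a successful find from position k lands at an index ≥ k
theorem pvFindFrom_ge (cs : List Char) (k : Nat) (hk : k ≤ cs.length)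
    (h : PySem.Chars.findFrom cs ['>'] (k : Int) none ≠ -1) :
    (k : Int) ≤ PySem.Chars.findFrom cs ['>'] (k : Int) none := by
  rw [PySem.Chars.findFrom_natCast cs ['>'] k hk] at h ⊢
  by_cases hf : PySem.Chars.find (List.drop k cs) ['>'] = -1
  · simp [hf] at h
  · have := PySem.Chars.neg_one_le_find (List.drop k cs) ['>']
    simp only [hf, if_false]
    omega

-- A's while-loop: index i, appended token list; s[i], s.find('>', i+1), s[i:j+1] as in the Python
def tokenize_special_go (cs : List Char) (tokens : List String) (i : Nat) : List String :=
  if h : i < cs.length then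
    if cs[i] = '<' then
      let j := PySem.Chars.findFrom cs ['>'] ((i : Int) + 1) none
      if hj : j = -1 then
        tokenize_special_go cs (tokens ++ [String.mk [cs[i]]]) (i + 1)
      else
        tokenize_special_go cs (tokens ++ [String.mk (PySem.List.slice cs (some (i : Int)) (some (j + 1)))]) (j.toNat + 1)
    else
      tokenize_special_go cs (tokens ++ [String.mk [cs[i]]]) (i + 1)
  else tokens
termination_by cs.length - i
decreasing_by
  · omega
  · have hk : ((i : Int) + 1) = ((i + 1 : Nat) : Int) := by push_cast; ring
    have hge := pvFindFrom_ge cs (i + 1) (by omega) (by rw [← hk]; exact hj)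
    rw [← hk] at hge
    have _hle : PySem.Chars.findFrom cs ['>'] ((i : Int) + 1) none ≤ cs.length := by
      rw [hk, PySem.Chars.findFrom_natCast cs ['>'] (i + 1) (by omega)]
      have := PySem.Chars.find_le_length (List.drop (i + 1) cs) ['>']
      have hdl : (List.drop (i + 1) cs).length = cs.length - (i + 1) := by
        simp [List.length_drop]
      split <;> omega
    omega
  · omega

def tokenize_special (s : String) : List String :=
  tokenize_special_go s.toList [] 0

-- ===== PORT B =====
-- B's for-loop over the characters: tokens so far, plus an optional pending '<...' buffer
def tokenize_special_alt_go : List Char → List String → Option (List Char) → List String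
  | [], tokens, none => tokens
  | [], tokens, some buf => tokens ++ buf.map (fun c => String.mk [c])
  | c :: rest, tokens, none =>
      if c = '<' then tokenize_special_alt_go rest tokens (some [c])
      else tokenize_special_alt_go rest (tokens ++ [String.mk [c]]) none
  | c :: rest, tokens, some buf =>
      if c = '>' then tokenize_special_alt_go rest (tokens ++ [String.mk (buf ++ [c])]) none
      else tokenize_special_alt_go rest tokens (some (buf ++ [c]))

def tokenize_special_alt (s : String) : List String :=
  tokenize_special_alt_go s.toList [] none

-- ===== PRECONDITION & SPEC =====
def Spec_tokenize_special (s : String) (out : List String) : Prop := out = tokenize_special_alt s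
instance (s : String) (out : List String) : Decidable (Spec_tokenize_special s out) := by unfold Spec_tokenize_special; infer_instance

-- ===== CLAIM (what is proved, stated in full; the proofs are below) =====
def Claim_equal_tokenize_special : Prop := ∀ (s : String), Dom_tokenize_special s → Spec_tokenize_special s (tokenize_special s)

-- ===== LEMMAS AND PROOFS =====

-- B's buffered phase, no '>' left: the buffer flushes as single-character tokens
theorem tokB_no_gt (rest : List Char) (h : '>' ∉ rest) :
    ∀ (tokens : List String) (buf : List Char),
      tokenize_special_alt_go rest tokens (some buf)
        = tokens ++ (buf ++ rest).map (fun c => String.mk [c]) := by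
  induction rest with
  | nil => intro tokens buf; simp [tokenize_special_alt_go]
  | cons c r ih =>
      intro tokens buf
      have hc : c ≠ '>' := fun hc => h (hc ▸ List.mem_cons_self)
      have hr : '>' ∉ r := fun hm => h (List.mem_cons_of_mem _ hm)
      simp only [tokenize_special_alt_go, if_neg hc, ih hr]
      simp

-- B's buffered phase, with a first '>' ahead: the buffer closes into one token
theorem tokB_gt (pre : List Char) (hp : '>' ∉ pre) :
    ∀ (post : List Char) (tokens : List String) (buf : List Char),
      tokenize_special_alt_go (pre ++ '>' :: post) tokens (some buf)
        = tokenize_special_alt_go post (tokens ++ [String.mk (buf ++ pre ++ ['>'])]) none := by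
  induction pre with
  | nil => intro post tokens buf; simp [tokenize_special_alt_go]
  | cons c p ih =>
      intro post tokens buf
      have hc : c ≠ '>' := fun hc => hp (hc ▸ List.mem_cons_self)
      have hpp : '>' ∉ p := fun hm => hp (List.mem_cons_of_mem _ hm)
      simp only [List.cons_append, tokenize_special_alt_go, if_neg hc, ih hpp]
      simp

-- A's loop once no '>' remains: every remaining character is its own token
theorem tokA_no_gt (cs : List Char) :
    ∀ (n i : Nat) (tokens : List String), cs.length - i ≤ n → '>' ∉ cs.drop i →
      tokenize_special_go cs tokens i = tokens ++ (cs.drop i).map (fun c => String.mk [c]) := by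
  intro n
  induction n with
  | zero =>
      intro i tokens hn _
      rw [tokenize_special_go]
      simp only [dif_neg (by omega : ¬ i < cs.length)]
      rw [List.drop_of_length_le (by omega)]
      simp
  | succ m ih =>
      intro i tokens hn hg
      rw [tokenize_special_go]
      by_cases h : i < cs.length
      · have hdrop : cs.drop i = cs[i] :: cs.drop (i + 1) := List.drop_eq_getElem_cons h
        have hg1 : '>' ∉ cs.drop (i + 1) := fun hm => hg (by rw [hdrop]; exact List.mem_cons_of_mem _ hm)
        simp only [dif_pos h]
        by_cases hlt : cs[i] = '<'
        · have hk : ((i : Int) + 1) = ((i + 1 : Nat) : Int) := by push_cast; ring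
          have hj : PySem.Chars.findFrom cs ['>'] ((i : Int) + 1) none = -1 := by
            rw [hk, PySem.Chars.findFrom_natCast cs ['>'] (i + 1) (by omega)]
            have : PySem.Chars.find (List.drop (i + 1) cs) ['>'] = -1 :=
              (PySem.Chars.find_eq_neg_one_iff _ _).2 (by
                rw [List.singleton_infix_iff]; exact hg1)
            simp [this]
          simp only [if_pos hlt, dif_pos hj]
          rw [ih (i + 1) _ (by omega) hg1, hdrop]
          simp only [List.map_cons, List.append_assoc, List.singleton_append]
        · simp only [if_neg hlt]
          rw [ih (i + 1) _ (by omega) hg1, hdrop]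
          simp only [List.map_cons, List.append_assoc, List.singleton_append]
      · simp only [dif_neg h]
        rw [List.drop_of_length_le (by omega)]
        simp

-- the first '>' of a list splits it: d = pre ++ '>' :: post with no '>' in pre
theorem find_gt_split (d : List Char) (h : PySem.Chars.find d ['>'] ≠ -1) :
    (PySem.Chars.find d ['>']).toNat < d.length ∧
    d = d.take (PySem.Chars.find d ['>']).toNat ++ '>' :: d.drop ((PySem.Chars.find d ['>']).toNat + 1) ∧
    '>' ∉ d.take (PySem.Chars.find d ['>']).toNat := by
  have h0 : 0 ≤ PySem.Chars.find d ['>'] := by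
    have := PySem.Chars.neg_one_le_find d ['>']; omega
  obtain ⟨hpre, hmin⟩ := PySem.Chars.find_spec h0
  set f := (PySem.Chars.find d ['>']).toNat with hf
  have hflt : f < d.length := by
    by_contra hge
    rw [List.drop_of_length_le (by omega)] at hpre
    simp at hpre
  have hget : d[f] = '>' := by
    obtain ⟨t, ht⟩ := hpre
    have hdd : d.drop f = '>' :: t := by rw [← ht]; rfl
    rw [List.drop_eq_getElem_cons hflt] at hdd
    injection hdd
  refine ⟨hflt, ?_, ?_⟩
  · conv_lhs => rw [← List.take_append_drop f d]
    rw [List.drop_eq_getElem_cons hflt, hget]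
  · intro hm
    obtain ⟨i, hi, hgi⟩ := List.mem_iff_getElem.1 hm
    have hi' : i < f := by
      simp only [List.length_take] at hi; omega
    have hilen : i < d.length := by omega
    apply hmin i hi'
    rw [List.drop_eq_getElem_cons hilen]
    refine ⟨d.drop (i + 1), ?_⟩
    have hdi : d[i] = '>' := by
      rw [← hgi]; simp [List.getElem_take]
    rw [hdi]
    rfl

-- main invariant: A's loop from index i equals B's loop on the suffix, idle state
theorem tok_main (cs : List Char) :
    ∀ (n i : Nat) (tokens : List String), cs.length - i ≤ n → i ≤ cs.length →
      tokenize_special_go cs tokens i = tokenize_special_alt_go (cs.drop i) tokens none := by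
  intro n
  induction n with
  | zero =>
      intro i tokens hn hi
      have : i = cs.length := by omega
      subst this
      rw [tokenize_special_go]
      simp [tokenize_special_alt_go]
  | succ m ih =>
      intro i tokens hn hi
      rw [tokenize_special_go]
      by_cases h : i < cs.length
      · have hdrop : cs.drop i = cs[i] :: cs.drop (i + 1) := List.drop_eq_getElem_cons h
        simp only [dif_pos h]
        by_cases hlt : cs[i] = '<'
        · have hk : ((i : Int) + 1) = ((i + 1 : Nat) : Int) := by push_cast; ring
          have hff := PySem.Chars.findFrom_natCast cs ['>'] (i + 1) (by omega : i + 1 ≤ cs.length)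
          set f := PySem.Chars.find (List.drop (i + 1) cs) ['>'] with hfdef
          by_cases hf : f = -1
          · -- no '>' after i: '<' is a lone token, rest are single chars
            have hj : PySem.Chars.findFrom cs ['>'] ((i : Int) + 1) none = -1 := by
              rw [hk, hff, if_pos hf]
            have hg1 : '>' ∉ cs.drop (i + 1) := by
              rw [← List.singleton_infix_iff]
              exact (PySem.Chars.find_eq_neg_one_iff _ _).1 hf
            simp only [if_pos hlt, dif_pos hj]
            rw [tokA_no_gt cs (cs.length) (i + 1) _ (by omega) hg1]
            rw [hdrop, hlt]
            simp only [tokenize_special_alt_go, if_true]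
            rw [tokB_no_gt _ hg1]
            simp
          · -- '>' found at absolute index i+1+f
            have h0f : 0 ≤ f := by
              have := PySem.Chars.neg_one_le_find (List.drop (i + 1) cs) ['>']; omega
            obtain ⟨hflt, hsplit, hnp⟩ := find_gt_split (cs.drop (i + 1)) hf
            set d := cs.drop (i + 1) with hd
            set pre := d.take f.toNat with hpre
            set post := d.drop (f.toNat + 1) with hpost
            have hj : PySem.Chars.findFrom cs ['>'] ((i : Int) + 1) none = (i + 1 : Int) + f := by
              rw [hk, hff, if_neg hf]
            have hjne : PySem.Chars.findFrom cs ['>'] ((i : Int) + 1) none ≠ -1 := by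
              rw [hj]; omega
            simp only [if_pos hlt, dif_neg hjne]
            have hdlen : d.length = cs.length - (i + 1) := by simp [hd]
            have hprelen : pre.length = f.toNat := by
              simp only [hpre, List.length_take]; omega
            -- A's token = '<' :: pre ++ ['>']
            have htok : PySem.List.slice cs (some (i : Int))
                (some (PySem.Chars.findFrom cs ['>'] ((i : Int) + 1) none + 1))
                = cs[i] :: (pre ++ ['>']) := by
              rw [hj]
              have hb : ((i : Int) + 1) + f + 1 = ((i + f.toNat + 2 : Nat) : Int) := by push_cast; omega
              rw [hb, PySem.List.slice_natCast]
              have hsub : i + f.toNat + 2 - i = f.toNat + 2 := by omega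
              rw [hsub, hdrop, hsplit]
              simp only [List.take_succ_cons]
              rw [← hprelen, List.take_length_add_append]
              simp
            rw [htok]
            -- next index for A
            have hnext : (PySem.Chars.findFrom cs ['>'] ((i : Int) + 1) none).toNat + 1
                = i + f.toNat + 2 := by
              rw [hj]; omega
            rw [hnext]
            -- B side
            rw [hdrop, hlt]
            simp only [tokenize_special_alt_go, if_true]
            rw [hsplit, tokB_gt pre hnp]
            have hpost' : post = cs.drop (i + f.toNat + 2) := by
              rw [hpost, hd, List.drop_drop]
              congr 1; omega
            rw [ih (i + f.toNat + 2) (tokens ++ [String.mk ('<' :: (pre ++ ['>']))]) (by omega) (by omega),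
               ← hpost']
            simp
        · simp only [if_neg hlt]
          rw [ih (i + 1) _ (by omega) (by omega), hdrop]
          simp only [tokenize_special_alt_go, if_neg hlt]
      · simp only [dif_neg h]
        rw [List.drop_of_length_le (by omega)]
        simp [tokenize_special_alt_go]

-- ===== VERDICT (by name: the statement is the Claim_ definition above) =====
theorem tokenize_special_spec : Claim_equal_tokenize_special := by
  intro s _
  unfold Spec_tokenize_special tokenize_special tokenize_special_alt
  rw [tok_main s.toList s.toList.length 0 [] (by omega) (by omega)]
  simp
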